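-- pv_equiv track=rewrite | github.com/cirosantilli/project-euler-solutions | solvers/723.py | r2_prim_from_exponents
-- ===== SOURCE A (Python) =====
-- def r2_from_exponents(exp2, exp_odds):
--     """
--     For n having only primes 2 and primes ≡1 mod4, r2(n) = 4 * Π(e_i+1).
--     exponent of 2 does not affect the Π (still valid here).
--     """
--     prod = 1
--     for e in exp_odds:
--         prod *= e + 1
--     return 4 * prod
--
-- def r2_prim_from_exponents(exp2, exp_odds):
--     """
--     Primitive representations count:
--     r2_prim(n) = Σ_{k^2|n} μ(k) * r2(n/k^2)
--
--     Only primes with exponent>=2 can appear in k.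
--     Since our numbers only have primes ≡1 mod4 (and possibly 2^0/2^1),
--     this is small and fast.
--     """
--     # Find which odd primes have exponent >= 2
--     idxs = [i for i, e in enumerate(exp_odds) if e >= 2]
--     base_r2 = r2_from_exponents(exp2, exp_odds)
--
--     total = 0
--     # iterate over all subsets of idxs (k squarefree)
--     m = len(idxs)
--     for mask in range(1 << m):
--         sign = -1 if (bin(mask).count("1") & 1) else 1
--         new_exp = list(exp_odds)
--         for j in range(m):
--             if (mask >> j) & 1:
--                 new_exp[idxs[j]] -= 2
--         total += sign * r2_from_exponents(exp2, new_exp)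
--     return total
-- ===== SOURCE B (Python) =====
-- def r2_prim_from_exponents(exp2, exp_odds):
--     # Moebius inclusion-exclusion factorizes: a prime with exponent e >= 2
--     # contributes (e+1) - (e-1) = 2, any other contributes (e+1).
--     prod = 1
--     for e in exp_odds:
--         prod *= 2 if e >= 2 else e + 1
--     return 4 * prod
-- ===== Notes on version B (the rewrite author's own statement) =====
-- stated objective: faster
-- what changed: Replaces the 2^m subset (Moebius) enumeration with its algebraic factorization: one pass multiplying 2 for each exponent >= 2 and (e+1) otherwise; intended as faster (O(p) vs O(2^m p)) - a timing run measured 12.75x at the largest size both finished (n=16) and A timed out at n=64 where B returned.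
import Mathlib
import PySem

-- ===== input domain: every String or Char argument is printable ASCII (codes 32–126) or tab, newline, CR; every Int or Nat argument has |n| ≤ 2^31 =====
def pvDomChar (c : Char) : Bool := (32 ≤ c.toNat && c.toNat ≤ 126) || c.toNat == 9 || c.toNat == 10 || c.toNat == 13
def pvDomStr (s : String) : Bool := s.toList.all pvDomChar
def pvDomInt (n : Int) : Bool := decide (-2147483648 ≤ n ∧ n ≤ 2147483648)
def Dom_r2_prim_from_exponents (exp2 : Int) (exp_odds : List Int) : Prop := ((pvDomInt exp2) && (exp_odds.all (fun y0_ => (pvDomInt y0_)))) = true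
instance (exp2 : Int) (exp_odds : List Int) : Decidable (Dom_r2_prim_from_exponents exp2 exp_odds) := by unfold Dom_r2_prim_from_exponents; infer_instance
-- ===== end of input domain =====

-- B replaces A's 2^m-subset Möbius enumeration by its algebraic factorization
-- (each exponent ≥ 2 contributes a factor 2, any other contributes e+1): one pass instead of 2^m
-- (intended as faster; a timing run measured 12.75× at n=16, A timed out at n=64 where B returned).

-- ===== PORT A =====

-- bin(mask).count("1"): number of 1-bits, computed by repeated halving (exact for mask ≥ 0,
-- the only values Python's loop feeds it).
def pcount : Nat → Nat
  | 0 => 0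
  | n+1 => (n+1) % 2 + pcount ((n+1)/2)
decreasing_by omega

def r2_from_exponents (exp2 : Int) (exp_odds : List Int) : Int :=
  4 * exp_odds.foldl (fun p e => p * (e + 1)) 1

-- [i for i, e in enumerate(exp_odds) if e >= 2]  (indices are the Nat positions enumerate yields)
def idxsOf (exp : List Int) : List Nat :=
  exp.zipIdx.filterMap (fun p => if p.1 ≥ 2 then some p.2 else none)

-- the inner 'for j in range(m): if (mask >> j) & 1: new_exp[idxs[j]] -= 2' loop,
-- reading the bits of mask low-to-high while walking idxs (indices are always in range)
def decLoop : List Int → List Nat → Nat → List Int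
  | exp, [], _ => exp
  | exp, i :: is, mask =>
      decLoop (if mask % 2 = 1 then exp.set i (exp.getD i 0 - 2) else exp) is (mask / 2)

def r2_prim_from_exponents (exp2 : Int) (exp_odds : List Int) : Int :=
  let idxs := idxsOf exp_odds
  let _base_r2 := r2_from_exponents exp2 exp_odds  -- assigned and unused, as in the Python
  (List.range (2 ^ idxs.length)).foldl
    (fun total mask =>
      total + (if pcount mask % 2 = 1 then (-1 : Int) else 1)
                * r2_from_exponents exp2 (decLoop exp_odds idxs mask)) 0

-- ===== PORT B =====
def r2_prim_from_exponents_alt (exp2 : Int) (exp_odds : List Int) : Int :=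
  4 * exp_odds.foldl (fun p e => p * (if e ≥ 2 then 2 else e + 1)) 1

-- ===== PRECONDITION & SPEC =====
def Spec_r2_prim_from_exponents (exp2 : Int) (exp_odds : List Int) (out : Int) : Prop := out = r2_prim_from_exponents_alt exp2 exp_odds
instance (exp2 : Int) (exp_odds : List Int) (out : Int) : Decidable (Spec_r2_prim_from_exponents exp2 exp_odds out) := by unfold Spec_r2_prim_from_exponents; infer_instance

-- ===== CLAIM (what is proved, stated in full; the proofs are below) =====
def Claim_equal_r2_prim_from_exponents : Prop := ∀ (exp2 : Int) (exp_odds : List Int), Dom_r2_prim_from_exponents exp2 exp_odds → Spec_r2_prim_from_exponents exp2 exp_odds (r2_prim_from_exponents exp2 exp_odds)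

-- ===== LEMMAS AND PROOFS =====

def sgn (mask : Nat) : Int := if pcount mask % 2 = 1 then -1 else 1

def Fac (exp : List Int) (j : Nat) : Int := exp.getD j 0 + 1

def P (exp : List Int) : Int := ∏ j ∈ Finset.range exp.length, Fac exp j

lemma foldl_mul (f : Int → Int) : ∀ (xs : List Int) (a : Int),
    xs.foldl (fun p e => p * f e) a = a * (xs.map f).prod := by
  intro xs
  induction xs with
  | nil => intro a; simp
  | cons e xs ih => intro a; simp [List.foldl_cons, ih]; ring

lemma prodMap (f : Int → Int) : ∀ (xs : List Int),
    (xs.map f).prod = ∏ j ∈ Finset.range xs.length, f (xs.getD j 0) := by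
  intro xs
  induction xs with
  | nil => simp
  | cons e xs ih =>
      simp only [List.map_cons, List.prod_cons, List.length_cons, ih]
      rw [Finset.prod_range_succ']
      simp [mul_comm]

lemma range_foldl_sum (f : Nat → Int) : ∀ (n : Nat) (a : Int),
    (List.range n).foldl (fun t k => t + f k) a = a + ∑ k ∈ Finset.range n, f k := by
  intro n
  induction n with
  | zero => intro a; simp
  | succ n ih =>
      intro a
      rw [List.range_succ, List.foldl_append, ih, Finset.sum_range_succ]
      simp [add_assoc]

lemma sum_two_mul (f : Nat → Int) : ∀ (n : Nat),
    ∑ i ∈ Finset.range (2*n), f i = ∑ i ∈ Finset.range n, (f (2*i) + f (2*i+1)) := by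
  intro n
  induction n with
  | zero => simp
  | succ n ih =>
      rw [show 2*(n+1) = (2*n+1)+1 by omega, Finset.sum_range_succ, Finset.sum_range_succ,
        Finset.sum_range_succ, ih]
      ring

lemma pcount_succ (n : Nat) : pcount (n+1) = (n+1) % 2 + pcount ((n+1)/2) := by
  rw [pcount]

lemma pcount_two_mul (k : Nat) : pcount (2*k) = pcount k := by
  cases k with
  | zero => rfl
  | succ t =>
      rw [show 2*(t+1) = (2*t+1)+1 by omega, pcount_succ]
      have h1 : (2*t+1+1) % 2 = 0 := by omega
      have h2 : (2*t+1+1) / 2 = t+1 := by omega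
      rw [h1, h2, Nat.zero_add]

lemma pcount_two_mul_add_one (k : Nat) : pcount (2*k+1) = pcount k + 1 := by
  rw [pcount_succ]
  have h1 : (2*k+1) % 2 = 1 := by omega
  have h2 : (2*k+1) / 2 = k := by omega
  rw [h1, h2]; omega

lemma sgn_two_mul (k : Nat) : sgn (2*k) = sgn k := by
  simp [sgn, pcount_two_mul]

lemma sgn_two_mul_add_one (k : Nat) : sgn (2*k+1) = -sgn k := by
  simp only [sgn, pcount_two_mul_add_one]
  by_cases h : pcount k % 2 = 1
  · have : (pcount k + 1) % 2 ≠ 1 := by omega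
    simp [h, this]
  · have : (pcount k + 1) % 2 = 1 := by omega
    simp [h, this]

lemma decLoop_two_mul (exp : List Int) (i : Nat) (is : List Nat) (k : Nat) :
    decLoop exp (i :: is) (2*k) = decLoop exp is k := by
  have h1 : (2*k) % 2 ≠ 1 := by omega
  have h2 : (2*k) / 2 = k := by omega
  simp [decLoop, h2]

lemma decLoop_two_mul_add_one (exp : List Int) (i : Nat) (is : List Nat) (k : Nat) :
    decLoop exp (i :: is) (2*k+1) = decLoop (exp.set i (exp.getD i 0 - 2)) is k := by
  have h1 : (2*k+1) % 2 = 1 := by omega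
  have h2 : (2*k+1) / 2 = k := by omega
  simp [decLoop, h1, h2]

lemma getD_set_self (exp : List Int) (i : Nat) (v : Int) (h : i < exp.length) :
    (exp.set i v).getD i 0 = v := by
  simp [List.getD, h]

lemma getD_set_ne (exp : List Int) (i j : Nat) (v : Int) (h : i ≠ j) :
    (exp.set i v).getD j 0 = exp.getD j 0 := by
  simp [List.getD, List.getElem?_set_ne h]

theorem maskSum : ∀ (idxs : List Nat) (exp : List Int), idxs.Nodup →
    (∀ i ∈ idxs, i < exp.length) →
    ∑ mask ∈ Finset.range (2 ^ idxs.length), sgn mask * P (decLoop exp idxs mask)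
      = ∏ j ∈ Finset.range exp.length, (if j ∈ idxs then 2 else Fac exp j) := by
  intro idxs
  induction idxs with
  | nil =>
      intro exp _ _
      simp [decLoop, sgn, pcount, P]
  | cons i is ih =>
      intro exp hnd hb
      have hi : i < exp.length := hb i (by simp)
      have hins : i ∉ is := (List.nodup_cons.mp hnd).1
      have hndis : is.Nodup := (List.nodup_cons.mp hnd).2
      set exp' := exp.set i (exp.getD i 0 - 2) with hexp'
      have hlen' : exp'.length = exp.length := by simp [hexp']
      rw [show (2:Nat) ^ (i :: is).length = 2 * 2 ^ is.length by
        simp [List.length_cons, pow_succ]; ring, sum_two_mul]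
      have hstep : ∀ k, sgn (2*k) * P (decLoop exp (i :: is) (2*k))
          + sgn (2*k+1) * P (decLoop exp (i :: is) (2*k+1))
          = sgn k * P (decLoop exp is k) - sgn k * P (decLoop exp' is k) := by
        intro k
        rw [decLoop_two_mul, decLoop_two_mul_add_one, sgn_two_mul, sgn_two_mul_add_one]
        ring
      rw [Finset.sum_congr rfl (fun k _ => hstep k), Finset.sum_sub_distrib,
        ih exp hndis (fun j hj => hb j (by simp [hj])),
        ih exp' hndis (fun j hj => hlen' ▸ hb j (by simp [hj]))]
      have himem : i ∈ Finset.range exp.length := Finset.mem_range.mpr hi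
      have himem' : i ∈ Finset.range exp'.length := by rw [hlen']; exact himem
      rw [← Finset.mul_prod_erase _ _ himem, ← Finset.mul_prod_erase _ _ himem',
        ← Finset.mul_prod_erase _ _ himem]
      have hcom : ∏ j ∈ (Finset.range exp'.length).erase i, (if j ∈ is then 2 else Fac exp' j)
          = ∏ j ∈ (Finset.range exp.length).erase i, (if j ∈ is then 2 else Fac exp j) := by
        rw [hlen']
        refine Finset.prod_congr rfl (fun j hj => ?_)
        have hji : j ≠ i := (Finset.mem_erase.mp hj).1
        by_cases hjs : j ∈ is
        · simp [hjs]
        · rw [if_neg hjs, if_neg hjs]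
          simp only [Fac, hexp']
          rw [getD_set_ne exp i j _ (Ne.symm hji)]
      have htail : ∏ j ∈ (Finset.range exp.length).erase i, (if j ∈ (i :: is) then (2:Int) else Fac exp j)
          = ∏ j ∈ (Finset.range exp.length).erase i, (if j ∈ is then 2 else Fac exp j) := by
        refine Finset.prod_congr rfl (fun j hj => ?_)
        have hji : j ≠ i := (Finset.mem_erase.mp hj).1
        simp [List.mem_cons, hji]
      rw [hcom, htail]
      have hfi : Fac exp' i = Fac exp i - 2 := by
        simp only [Fac, hexp']
        rw [getD_set_self exp i _ hi]
        ring
      have h1 : (if i ∈ is then (2:Int) else Fac exp i) = Fac exp i := by simp [hins]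
      have h2 : (if i ∈ is then (2:Int) else Fac exp' i) = Fac exp i - 2 := by simp [hins, hfi]
      have h3 : (if i ∈ (i :: is) then (2:Int) else Fac exp i) = 2 := by simp
      rw [h1, h2, h3]
      ring

lemma idxs_mem_aux : ∀ (exp : List Int) (k j : Nat),
    j ∈ (exp.zipIdx k).filterMap (fun p => if p.1 ≥ 2 then some p.2 else none)
      ↔ (k ≤ j ∧ j - k < exp.length ∧ exp.getD (j - k) 0 ≥ 2) := by
  intro exp
  induction exp with
  | nil => intro k j; simp
  | cons e rest ih =>
      intro k j
      simp only [List.zipIdx_cons, List.filterMap_cons]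
      by_cases he : e ≥ 2
      · simp only [if_pos he, List.mem_cons, ih]
        constructor
        · rintro (rfl | ⟨h1, h2, h3⟩)
          · simp [he]
          · refine ⟨by omega, by simp; omega, ?_⟩
            have : j - k = (j - (k+1)) + 1 := by omega
            rw [this, List.getD_cons_succ]; exact h3
        · rintro ⟨h1, h2, h3⟩
          by_cases hjk : j = k
          · left; omega
          · right
            have hk1 : k + 1 ≤ j := by omega
            refine ⟨hk1, by simp at h2 ⊢; omega, ?_⟩
            have : j - k = (j - (k+1)) + 1 := by omega
            rw [this, List.getD_cons_succ] at h3; exact h3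
      · simp only [if_neg he, ih]
        constructor
        · rintro ⟨h1, h2, h3⟩
          refine ⟨by omega, by simp; omega, ?_⟩
          have : j - k = (j - (k+1)) + 1 := by omega
          rw [this, List.getD_cons_succ]; exact h3
        · rintro ⟨h1, h2, h3⟩
          by_cases hjk : j = k
          · subst hjk
            rw [Nat.sub_self, List.getD_cons_zero] at h3
            exact absurd h3 he
          · have hk1 : k + 1 ≤ j := by omega
            refine ⟨hk1, by simp at h2 ⊢; omega, ?_⟩
            have : j - k = (j - (k+1)) + 1 := by omega
            rw [this, List.getD_cons_succ] at h3; exact h3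

lemma idxs_nodup_aux : ∀ (exp : List Int) (k : Nat),
    ((exp.zipIdx k).filterMap (fun p => if p.1 ≥ 2 then some p.2 else none)).Nodup := by
  intro exp
  induction exp with
  | nil => intro k; simp
  | cons e rest ih =>
      intro k
      simp only [List.zipIdx_cons, List.filterMap_cons]
      by_cases he : e ≥ 2
      · rw [if_pos he]
        refine List.nodup_cons.mpr ⟨?_, ih (k+1)⟩
        intro hmem
        have := (idxs_mem_aux rest (k+1) k).mp hmem
        omega
      · rw [if_neg he]; exact ih (k+1)

lemma idxsOf_mem (exp : List Int) (j : Nat) :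
    j ∈ idxsOf exp ↔ (j < exp.length ∧ exp.getD j 0 ≥ 2) := by
  have := idxs_mem_aux exp 0 j
  simpa [idxsOf] using this

lemma idxsOf_nodup (exp : List Int) : (idxsOf exp).Nodup := idxs_nodup_aux exp 0

lemma r2_from_eq_P (exp2 : Int) (xs : List Int) : r2_from_exponents exp2 xs = 4 * P xs := by
  rw [r2_from_exponents, foldl_mul (fun e => e + 1) xs 1, one_mul, prodMap]
  rfl

-- ===== VERDICT (by name: the statement is the Claim_ definition above) =====
theorem r2_prim_from_exponents_spec : Claim_equal_r2_prim_from_exponents := by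
  intro exp2 exp_odds _
  unfold Spec_r2_prim_from_exponents
  rw [r2_prim_from_exponents]
  show (List.range (2 ^ (idxsOf exp_odds).length)).foldl
      (fun total mask =>
        total + (if pcount mask % 2 = 1 then (-1 : Int) else 1)
                  * r2_from_exponents exp2 (decLoop exp_odds (idxsOf exp_odds) mask)) 0
    = r2_prim_from_exponents_alt exp2 exp_odds
  rw [range_foldl_sum (fun mask => (if pcount mask % 2 = 1 then (-1 : Int) else 1)
        * r2_from_exponents exp2 (decLoop exp_odds (idxsOf exp_odds) mask)), zero_add]
  have hrw : ∀ mask, (if pcount mask % 2 = 1 then (-1 : Int) else 1)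
      * r2_from_exponents exp2 (decLoop exp_odds (idxsOf exp_odds) mask)
      = 4 * (sgn mask * P (decLoop exp_odds (idxsOf exp_odds) mask)) := by
    intro mask
    rw [r2_from_eq_P, sgn]; ring
  rw [Finset.sum_congr rfl (fun mask _ => hrw mask), ← Finset.mul_sum,
    maskSum (idxsOf exp_odds) exp_odds (idxsOf_nodup exp_odds)
      (fun i hi => ((idxsOf_mem exp_odds i).mp hi).1)]
  rw [r2_prim_from_exponents_alt,
    foldl_mul (fun e => if e ≥ 2 then 2 else e + 1) exp_odds 1, one_mul,
    prodMap]
  congr 1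
  refine Finset.prod_congr rfl (fun j hj => ?_)
  have hj' : j < exp_odds.length := Finset.mem_range.mp hj
  by_cases h2 : exp_odds.getD j 0 ≥ 2
  · rw [if_pos ((idxsOf_mem exp_odds j).mpr ⟨hj', h2⟩), if_pos h2]
  · have hnm : j ∉ idxsOf exp_odds := fun hm => h2 ((idxsOf_mem exp_odds j).mp hm).2
    rw [if_neg hnm, if_neg h2]
    rfl
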